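-- pv_equiv track=rewrite | github.com/Amirresm/empirical_peft_suite | suite/src/text_utils.py | multiplt_split
-- ===== SOURCE A (Python) =====
-- def multiplt_split(input):
--     content = input
--     comment = ""
--     signature = ""
--     code = ""
--     for line in content.splitlines():
--         if line.startswith("#") and not signature:
--             comment += line + "\n"
--         else:
--             if not signature:
--                 signature = line + "\n"
--             else:
--                 code += line + "\n"
--     prompt = comment + signature
--     completion = code
--     return prompt, completion
-- ===== SOURCE B (Python) =====
-- def multiplt_split(input):
--     lines = input.splitlines()
--     i = 0
--     while i < len(lines) and lines[i].startswith("#"):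
--         i += 1
--     comment = "".join(l + "\n" for l in lines[:i])
--     signature = lines[i] + "\n" if i < len(lines) else ""
--     code = "".join(l + "\n" for l in lines[i + 1:])
--     return comment + signature, code
-- ===== Notes on version B (the rewrite author's own statement) =====
-- stated objective: simpler
-- what changed: Replaces the per-line three-accumulator state machine with a prefix-boundary scan (first line not starting with '#') followed by slice-based joins.
import Mathlib
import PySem

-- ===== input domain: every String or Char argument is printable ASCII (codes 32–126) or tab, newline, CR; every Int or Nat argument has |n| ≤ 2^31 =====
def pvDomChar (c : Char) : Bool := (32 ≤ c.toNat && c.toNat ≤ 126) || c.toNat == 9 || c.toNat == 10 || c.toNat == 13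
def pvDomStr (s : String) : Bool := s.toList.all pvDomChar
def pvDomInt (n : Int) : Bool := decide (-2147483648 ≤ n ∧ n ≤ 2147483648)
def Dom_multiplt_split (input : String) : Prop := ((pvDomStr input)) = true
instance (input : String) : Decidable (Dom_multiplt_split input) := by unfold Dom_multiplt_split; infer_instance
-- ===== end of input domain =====

-- B replaces A's per-line three-accumulator state machine with a prefix-boundary scan and slice-based joins (objective: simpler); return values proved equal.
-- ===== PORT A =====
-- loop body of A, extracted as a named helper (same state, same branches)
def pvStepA : (String × String × String) → String → (String × String × String) :=
  fun st line =>
    let comment := st.1; let signature := st.2.1; let code := st.2.2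
    if PySem.Str.startswith line "#" && signature == "" then
      (comment ++ (line ++ "\n"), signature, code)
    else if signature == "" then
      (comment, line ++ "\n", code)
    else
      (comment, signature, code ++ (line ++ "\n"))

def multiplt_split (input : String) : String × String :=
  let r := (PySem.Str.splitlines input).foldl pvStepA ("", "", "")
  (r.1 ++ r.2.1, r.2.2)

-- ===== PORT B =====
def multiplt_split_alt (input : String) : String × String :=
  let lines := PySem.Str.splitlines input
  let pre := lines.takeWhile (fun l => PySem.Str.startswith l "#")
  let comment := String.join (pre.map (· ++ "\n"))
  match lines.drop pre.length with
  | [] => (comment, "")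
  | s :: cs => (comment ++ (s ++ "\n"), String.join (cs.map (· ++ "\n")))

-- ===== PRECONDITION & SPEC =====
def Spec_multiplt_split (input : String) (out : String × String) : Prop := out = multiplt_split_alt input
instance (input : String) (out : String × String) : Decidable (Spec_multiplt_split input out) := by unfold Spec_multiplt_split; infer_instance

-- ===== CLAIM (what is proved, stated in full; the proofs are below) =====
def Claim_equal_multiplt_split : Prop := ∀ (input : String), Dom_multiplt_split input → Spec_multiplt_split input (multiplt_split input)

-- ===== LEMMAS AND PROOFS =====

-- proof-only helper: the common "scan the '#' prefix, then split" recursion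
def altGo (c : String) (lines : List String) : String × String :=
  match lines with
  | [] => (c, "")
  | l :: ls =>
      if PySem.Str.startswith l "#" then altGo (c ++ (l ++ "\n")) ls
      else (c ++ (l ++ "\n"), String.join (ls.map (· ++ "\n")))

lemma join_nil : String.join ([] : List String) = "" := rfl

lemma join_foldl_aux (xs : List String) (a : String) :
    xs.foldl (· ++ ·) a = a ++ String.join xs := by
  induction xs generalizing a with
  | nil => rw [List.foldl_nil, join_nil, String.append_empty]
  | cons x xs ih =>
      rw [List.foldl_cons, show String.join (x :: xs) = xs.foldl (· ++ ·) ("" ++ x) from rfl,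
        ih, ih, String.empty_append, String.append_assoc]

lemma join_cons (x : String) (xs : List String) :
    String.join (x :: xs) = x ++ String.join xs := by
  rw [show String.join (x :: xs) = xs.foldl (· ++ ·) ("" ++ x) from rfl, join_foldl_aux,
    String.empty_append]

lemma append_nl_ne (l : String) : l ++ "\n" ≠ "" := by
  intro hEq
  have h2 := congrArg String.toList hEq
  simp at h2

lemma foldl_sig_ne (lines : List String) (c s k : String) (hs : s ≠ "") :
    lines.foldl pvStepA (c, s, k) = (c, s, k ++ String.join (lines.map (· ++ "\n"))) := by
  induction lines generalizing k with
  | nil => rw [List.foldl_nil, List.map_nil, join_nil, String.append_empty]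
  | cons l ls ih =>
      have hb : (s == "") = false := by simpa using hs
      have e : pvStepA (c, s, k) l = (c, s, k ++ (l ++ "\n")) := by
        simp only [pvStepA]
        rw [hb]
        simp
      rw [List.foldl_cons, e, ih, List.map_cons, join_cons, String.append_assoc]

lemma foldl_finish (lines : List String) (c : String) :
    ((lines.foldl pvStepA (c, "", "")).1 ++ (lines.foldl pvStepA (c, "", "")).2.1,
      (lines.foldl pvStepA (c, "", "")).2.2) = altGo c lines := by
  induction lines generalizing c with
  | nil => rw [altGo, List.foldl_nil, String.append_empty]
  | cons l ls ih =>
      by_cases h : PySem.Str.startswith l "#"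
      · have e : pvStepA (c, "", "") l = (c ++ (l ++ "\n"), "", "") := by
          simp only [pvStepA]
          rw [h]
          simp
        rw [List.foldl_cons, e, altGo, if_pos h]
        exact ih (c ++ (l ++ "\n"))
      · rw [Bool.not_eq_true] at h
        have e : pvStepA (c, "", "") l = (c, l ++ "\n", "") := by
          simp only [pvStepA]
          rw [h]
          simp
        rw [List.foldl_cons, e, foldl_sig_ne _ _ _ _ (append_nl_ne l), altGo,
          if_neg (by simpa using h), String.empty_append]

lemma altGo_eq (lines : List String) (c : String) :
    altGo c lines =
      (match lines.drop ((lines.takeWhile (fun l => PySem.Str.startswith l "#")).length) with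
       | [] =>
           (c ++ String.join (((lines.takeWhile (fun l => PySem.Str.startswith l "#")).map (· ++ "\n"))), "")
       | s :: cs =>
           (c ++ (String.join (((lines.takeWhile (fun l => PySem.Str.startswith l "#")).map (· ++ "\n"))) ++ (s ++ "\n")),
            String.join (cs.map (· ++ "\n")))) := by
  induction lines generalizing c with
  | nil => rw [altGo]; simp [join_nil, String.append_empty]
  | cons l ls ih =>
      by_cases h : PySem.Str.startswith l "#"
      · rw [altGo, if_pos h, ih]
        simp only [List.takeWhile_cons, h, if_pos, List.length_cons, List.drop_succ_cons]
        cases hd : ls.drop ((ls.takeWhile (fun l => PySem.Str.startswith l "#")).length) with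
        | nil => simp only [List.map_cons, join_cons, String.append_assoc]
        | cons s cs => simp only [List.map_cons, join_cons, String.append_assoc]
      · rw [Bool.not_eq_true] at h
        rw [altGo, if_neg (by simpa using h)]
        simp only [List.takeWhile_cons, h, Bool.false_eq_true, if_false, List.length_nil,
          List.drop_zero, List.map_nil, join_nil, String.empty_append]

-- ===== VERDICT (by name: the statement is the Claim_ definition above) =====
theorem multiplt_split_spec : Claim_equal_multiplt_split := by
  intro input _
  unfold Spec_multiplt_split
  simp only [multiplt_split, multiplt_split_alt]
  rw [foldl_finish, altGo_eq]
  cases hd : (PySem.Str.splitlines input).drop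
      (((PySem.Str.splitlines input).takeWhile (fun l => PySem.Str.startswith l "#")).length) with
  | nil => simp only [String.empty_append]
  | cons s cs => simp only [String.empty_append]
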